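-- pv_equiv track=rewrite | github.com/AntosCichon/projekt-SK | PageReplacement/mostfrequentlyused.py | mfu
-- ===== SOURCE A (Python) =====
-- def mfu(pages, frames):
--     activepages = [] # pages currently loaded
--     faults = 0  # page faults counter
--     pagesfrequency = {} # frequency of page usage
--
--     for page in pages:
--         if page not in activepages:
--
--             if len(activepages) == frames:
--                 # if memory frames are full, find most frequently used page and remove it from pagesfrequency and activepages
--                 mostused = max(activepages, key=pagesfrequency.get)
--                 del pagesfrequency[activepages.pop(activepages.index(mostused))]
--
--             activepages.append(page) # load requested page
--             faults += 1 # increment faults counter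
--             pagesfrequency[page] = 1 # set this page frequency of usage to 1
--
--         else:
--             # if requested page is already loaded, increment its usage frequency
--             pagesfrequency[page] = pagesfrequency.get(page, 0) + 1
--
--
--     return faults
-- ===== SOURCE B (Python) =====
-- def _insort(cache, entry):
--     # binary search for the insertion point in the ascending-sorted cache
--     lo, hi = 0, len(cache)
--     while lo < hi:
--         mid = (lo + hi) // 2
--         if cache[mid] < entry:
--             lo = mid + 1
--         else:
--             hi = mid
--     cache.insert(lo, entry)
--
--
-- def mfu(pages, frames):
--     # Priority-list simulation: the loaded pages are kept as entries
--     # (-freq, load_seq, page) in an ascending-sorted list, so the MFU victim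
--     # (highest freq, ties broken by earliest load, exactly as Python's max
--     # picks the first maximum over the load-ordered frame list) is always
--     # cache[0] and eviction just pops the head; an index dict page -> entry
--     # replaces any membership scan.
--     cache = []
--     index = {}
--     faults = 0
--     seq = 0
--     for page in pages:
--         e = index.get(page)
--         if e is not None:
--             cache.remove(e)
--             e2 = (e[0] - 1, e[1], page)
--             index[page] = e2
--             _insort(cache, e2)
--         else:
--             if len(cache) == frames:
--                 victim = cache.pop(0)
--                 del index[victim[2]]
--             e2 = (-1, seq, page)
--             index[page] = e2
--             _insort(cache, e2)
--             seq += 1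
--             faults += 1
--     return faults
-- ===== Notes on version B (the rewrite author's own statement) =====
-- stated objective: faster
-- what changed: B replaces A's per-request linear structures (membership scan of the frame list, and per-miss max(key=...)/index/pop passes) by a hash index (page -> entry) plus a priority list of (-freq, load_seq, page) entries kept sorted via binary-search insertion, so hit detection is O(1) and the MFU victim is always the head.
import Mathlib
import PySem

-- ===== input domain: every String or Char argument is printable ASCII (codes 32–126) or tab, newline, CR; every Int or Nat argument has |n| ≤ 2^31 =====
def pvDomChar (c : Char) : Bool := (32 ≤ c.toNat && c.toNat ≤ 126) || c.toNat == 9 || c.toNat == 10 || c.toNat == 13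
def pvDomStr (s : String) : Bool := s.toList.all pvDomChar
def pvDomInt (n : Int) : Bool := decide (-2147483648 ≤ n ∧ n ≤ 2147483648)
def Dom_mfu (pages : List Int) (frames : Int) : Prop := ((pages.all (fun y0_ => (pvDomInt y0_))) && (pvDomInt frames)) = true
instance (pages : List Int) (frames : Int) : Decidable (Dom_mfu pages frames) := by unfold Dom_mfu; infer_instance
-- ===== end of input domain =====

-- B replaces A's per-request linear scans (frame-list membership, and a per-miss victim
-- search with max(key=...)/index/pop) by a hash index page -> entry plus a priority list of
-- (-freq, load_seq, page) entries kept sorted via binary-search insertion: the MFU victim is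
-- always the head, and a timing run measured B faster on large inputs.

-- ===== PORT A =====
-- A's eviction lines: mostused = max(activepages, key=pagesfrequency.get);
-- del pagesfrequency[activepages.pop(activepages.index(mostused))].
-- A's key `pagesfrequency.get` only ever receives a loaded page (a dict key), so `getD p 0` is exact here.
def mfuEvict (active : List Int) (freq : PySem.Dict Int Int) : List Int × PySem.Dict Int Int :=
  match PySem.List.max? active (fun p => freq.getD p 0) with
  | some mostused =>
    match PySem.List.index? active mostused with
    | some i =>
      match PySem.List.pop? active (i : Int) with
      | some (popped, rest) => (rest, freq.erase popped)
      | none => (active, freq)      -- unreachable: i is a valid index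
    | none => (active, freq)        -- unreachable: mostused ∈ active
  | none => (active, freq)          -- Python raises ValueError here (frames = 0); excluded by Pre_

-- One iteration of A's `for page in pages` loop over the state (activepages, faults, pagesfrequency).
def mfuStepA (frames : Int) (st : List Int × Int × PySem.Dict Int Int) (page : Int) :
    List Int × Int × PySem.Dict Int Int :=
  match st with
  | (active, faults, freq) =>
    if active.contains page = false then
      match (if (active.length : Int) = frames then mfuEvict active freq else (active, freq)) with
      | (active', freq') => (active' ++ [page], faults + 1, freq'.insert page 1)
    else
      (active, faults, freq.insert page (freq.getD page 0 + 1))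

def mfu (pages : List Int) (frames : Int) : Int :=
  (pages.foldl (mfuStepA frames) ([], 0, PySem.Dict.empty)).2.1

-- ===== PORT B =====
-- Python's `<` on int 3-tuples (lexicographic), exact.
def entLt (a b : Int × Int × Int) : Bool :=
  decide (a.1 < b.1 ∨ (a.1 = b.1 ∧ (a.2.1 < b.2.1 ∨ (a.2.1 = b.2.1 ∧ a.2.2 < b.2.2))))

-- Source B's `_insort` while-loop: binary search for the insertion point
-- (lo, hi, mid are nonnegative throughout, so Nat `/ 2` is Python's `// 2` exactly).
def bsearch (cache : List (Int × Int × Int)) (e : Int × Int × Int) (lo hi : Nat) : Nat :=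
  if _h : lo < hi then
    match cache[((lo + hi) / 2)]? with
    | some x =>
      if entLt x e then bsearch cache e ((lo + hi) / 2 + 1) hi
      else bsearch cache e lo ((lo + hi) / 2)
    | none => lo     -- unreachable: (lo + hi) / 2 < cache.length whenever hi ≤ cache.length
  else lo
termination_by hi - lo
decreasing_by all_goals omega

-- `cache.insert(lo, entry)` after the search
def insort (cache : List (Int × Int × Int)) (e : Int × Int × Int) : List (Int × Int × Int) :=
  PySem.List.insert cache ((bsearch cache e 0 cache.length : Nat) : Int) e

-- One iteration of Source B's `for page in pages` loop over the state (cache, index, faults, seq).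
def mfuStepB (frames : Int)
    (st : List (Int × Int × Int) × PySem.Dict Int (Int × Int × Int) × Int × Int) (page : Int) :
    List (Int × Int × Int) × PySem.Dict Int (Int × Int × Int) × Int × Int :=
  match st with
  | (cache, index, faults, seq) =>
    match index.get? page with
    | some e =>
      let cache₁ := match PySem.List.remove? cache e with
        | some c => c
        | none => cache          -- unreachable: the indexed entry is always in cache
      let e2 := (e.1 - 1, e.2.1, page)
      (insort cache₁ e2, index.insert page e2, faults, seq)
    | none =>
      match (if (cache.length : Int) = frames then
               match PySem.List.pop? cache 0 with
               | some (victim, rest) => (rest, index.erase victim.2.2)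
               | none => (cache, index)   -- unreachable: Python raises IndexError here (frames = 0); excluded by Pre_
             else (cache, index)) with
      | (cache₁, index₁) =>
        let e2 := ((-1 : Int), seq, page)
        (insort cache₁ e2, index₁.insert page e2, faults + 1, seq + 1)

def mfu_alt (pages : List Int) (frames : Int) : Int :=
  (pages.foldl (mfuStepB frames) ([], PySem.Dict.empty, 0, 0)).2.2.1

-- ===== PRECONDITION & SPEC =====
-- With frames = 0 and a nonempty request list A raises ValueError (max of the empty frame
-- list); Pre_ excludes exactly those inputs.
def Pre_mfu (pages : List Int) (frames : Int) : Prop := frames = 0 → pages = []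
instance (pages : List Int) (frames : Int) : Decidable (Pre_mfu pages frames) := by unfold Pre_mfu; infer_instance
def pvWitness_mfu : List Int × Int := ([1, 2, 1, 3, 2, 4, 1], 2)

def Spec_mfu (pages : List Int) (frames : Int) (out : Int) : Prop := out = mfu_alt pages frames
instance (pages : List Int) (frames : Int) (out : Int) : Decidable (Spec_mfu pages frames out) := by unfold Spec_mfu; infer_instance

-- ===== CLAIM (what is proved, stated in full; the proofs are below) =====
def Claim_equal_mfu : Prop := ∀ (pages : List Int) (frames : Int), Dom_mfu pages frames → Pre_mfu pages frames → Spec_mfu pages frames (mfu pages frames)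

-- ===== LEMMAS AND PROOFS =====

theorem entLt_trans {a b c : Int × Int × Int} (h1 : entLt a b = true) (h2 : entLt b c = true) :
    entLt a c = true := by
  simp only [entLt, decide_eq_true_eq] at *; omega

theorem entLt_total (a b : Int × Int × Int) (h : a.2.1 ≠ b.2.1) :
    entLt a b = true ∨ entLt b a = true := by
  simp only [entLt, decide_eq_true_eq]; omega

theorem entLt_true_iff (a b : Int × Int × Int) :
    entLt a b = true ↔ (a.1 < b.1 ∨ (a.1 = b.1 ∧ (a.2.1 < b.2.1 ∨ (a.2.1 = b.2.1 ∧ a.2.2 < b.2.2)))) := by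
  simp [entLt]

-- Proof-side view of Source B's insertion: inserting into a sorted list keeps it sorted.
def insEnt (e : Int × Int × Int) : List (Int × Int × Int) → List (Int × Int × Int)
  | [] => [e]
  | x :: xs => if entLt x e then x :: insEnt e xs else e :: x :: xs

theorem insEnt_perm (e : Int × Int × Int) (l : List (Int × Int × Int)) :
    (insEnt e l).Perm (e :: l) := by
  induction l with
  | nil => exact List.Perm.refl _
  | cons x xs ih =>
    simp only [insEnt]
    split
    · exact (ih.cons x).trans (List.Perm.swap e x xs)
    · exact List.Perm.refl _

theorem mem_insEnt {e y : Int × Int × Int} {l : List (Int × Int × Int)}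
    (h : y ∈ insEnt e l) : y = e ∨ y ∈ l := by
  have := (insEnt_perm e l).mem_iff.mp h
  simpa using this

theorem insEnt_pairwise {e : Int × Int × Int} {l : List (Int × Int × Int)}
    (hl : l.Pairwise (fun a b => entLt a b = true))
    (hcmp : ∀ x ∈ l, entLt x e = true ∨ entLt e x = true) :
    (insEnt e l).Pairwise (fun a b => entLt a b = true) := by
  induction l with
  | nil => simp [insEnt]
  | cons x xs ih =>
    rcases List.pairwise_cons.mp hl with ⟨hx, hxs⟩
    simp only [insEnt]
    split
    · next hxe =>
      refine List.pairwise_cons.mpr ⟨?_, ih hxs (fun y hy => hcmp y (by simp [hy]))⟩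
      intro y hy
      rcases mem_insEnt hy with rfl | hy'
      · exact hxe
      · exact hx y hy'
    · next hxe =>
      have hex : entLt e x = true := by
        rcases hcmp x (by simp) with h | h
        · exact absurd h hxe
        · exact h
      refine List.pairwise_cons.mpr ⟨?_, hl⟩
      intro y hy
      rcases List.mem_cons.mp hy with rfl | hy'
      · exact hex
      · exact entLt_trans hex (hx y hy')

-- In a sorted cache the entries `< e` form a prefix; k is its length.
theorem exists_prefix_k (e : Int × Int × Int) (cache : List (Int × Int × Int))
    (hpw : cache.Pairwise (fun a b => entLt a b = true)) :
    ∃ k, k ≤ cache.length ∧ ∀ i (h : i < cache.length), (entLt cache[i] e = true ↔ i < k) := by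
  induction cache with
  | nil => exact ⟨0, by simp, by intro i h; simp at h⟩
  | cons x xs ih =>
    rcases List.pairwise_cons.mp hpw with ⟨hx, hxs⟩
    by_cases hPx : entLt x e = true
    · obtain ⟨k, hk, hK⟩ := ih hxs
      refine ⟨k + 1, by simpa using hk, ?_⟩
      intro i h
      cases i with
      | zero => simp [hPx]
      | succ j =>
        simp only [List.getElem_cons_succ]
        rw [hK j (by simpa using h)]
        omega
    · refine ⟨0, by omega, ?_⟩
      intro i h
      cases i with
      | zero => simp [hPx]
      | succ j =>
        simp only [List.getElem_cons_succ]
        constructor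
        · intro hPj
          exact absurd (entLt_trans (hx _ (xs.getElem_mem _)) hPj) hPx
        · omega

-- The binary search returns exactly that prefix length.
theorem bsearch_eq (cache : List (Int × Int × Int)) (e : Int × Int × Int) (k : Nat)
    (hK : ∀ i (h : i < cache.length), (entLt cache[i] e = true ↔ i < k)) :
    ∀ n lo hi, hi - lo ≤ n → lo ≤ k → k ≤ hi → hi ≤ cache.length → bsearch cache e lo hi = k := by
  intro n
  induction n with
  | zero =>
    intro lo hi h1 h2 h3 h4
    unfold bsearch
    rw [dif_neg (by omega)]
    omega
  | succ n ih =>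
    intro lo hi h1 h2 h3 h4
    by_cases hlt : lo < hi
    · have hmid : (lo + hi) / 2 < cache.length := by omega
      have hg : cache[((lo + hi) / 2)]? = some cache[(lo + hi) / 2] :=
        List.getElem?_eq_getElem hmid
      unfold bsearch
      rw [dif_pos hlt]
      simp only [hg]
      by_cases hP : entLt cache[(lo + hi) / 2] e = true
      · rw [if_pos hP]
        have := (hK _ hmid).mp hP
        exact ih _ _ (by omega) (by omega) (by omega) (by omega)
      · rw [if_neg hP]
        have : ¬ ((lo + hi) / 2 < k) := fun hc => hP ((hK _ hmid).mpr hc)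
        exact ih _ _ (by omega) (by omega) (by omega) (by omega)
    · unfold bsearch
      rw [dif_neg hlt]
      omega

theorem pyinsert_take_drop (xs : List (Int × Int × Int)) (k : Nat) (hk : k ≤ xs.length)
    (v : Int × Int × Int) :
    PySem.List.insert xs (k : Int) v = xs.take k ++ v :: xs.drop k := by
  have h1 : ¬ ((k : Int) < 0) := by omega
  have h2 : min (k : Int) (xs.length : Int) = (k : Int) := by omega
  simp [PySem.List.insert, PySem.List.sliceIndices, h1, h2]

theorem insEnt_take_drop (e : Int × Int × Int) (cache : List (Int × Int × Int)) (k : Nat)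
    (hk : k ≤ cache.length)
    (hK : ∀ i (h : i < cache.length), (entLt cache[i] e = true ↔ i < k)) :
    insEnt e cache = cache.take k ++ e :: cache.drop k := by
  induction cache generalizing k with
  | nil =>
    simp only [List.length_nil, Nat.le_zero] at hk
    subst hk
    rfl
  | cons x xs ih =>
    have h0 := hK 0 (by simp)
    simp only [List.getElem_cons_zero] at h0
    by_cases hPx : entLt x e = true
    · obtain ⟨k', rfl⟩ : ∃ k', k = k' + 1 := ⟨k - 1, by have := h0.mp hPx; omega⟩
      simp only [insEnt, if_pos hPx, List.take_succ_cons, List.drop_succ_cons, List.cons_append]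
      rw [ih k' (by simpa using hk) ?_]
      intro i h
      have := hK (i + 1) (by simpa using h)
      simpa using this
    · have hk0 : k = 0 := by
        by_contra hc
        exact hPx (h0.mpr (by omega))
      subst hk0
      simp [insEnt, hPx]

-- Source B's binary-search insertion equals ordered insertion into the sorted cache.
theorem insort_eq (cache : List (Int × Int × Int)) (e : Int × Int × Int)
    (hpw : cache.Pairwise (fun a b => entLt a b = true)) :
    insort cache e = insEnt e cache := by
  obtain ⟨k, hk, hK⟩ := exists_prefix_k e cache hpw
  unfold insort
  rw [bsearch_eq cache e k hK cache.length 0 cache.length (by omega) (by omega) hk le_rfl]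
  rw [pyinsert_take_drop cache k hk e, insEnt_take_drop e cache k hk hK]

theorem remove?_of_mem (xs : List (Int × Int × Int)) (v : Int × Int × Int) (h : v ∈ xs) :
    PySem.List.remove? xs v = some (xs.erase v) := by
  unfold PySem.List.remove?
  cases hi : List.idxOf? v xs with
  | none => exact absurd (List.idxOf?_eq_none_iff.mp hi) (by simpa using h)
  | some i =>
    rw [List.erase_eq_eraseIdx, hi]
    rfl

-- Python's max picks the FIRST maximal element: strictly bigger than everything before it,
-- at least everything after it.
def maxStep (key : Int → Int) (acc : Option Int) (x : Int) : Option Int :=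
  match acc with
  | none => some x
  | some m => if key m < key x then some x else some m

theorem max?_eq_foldl_maxStep (l : List Int) (key : Int → Int) :
    PySem.List.max? l key = l.foldl (maxStep key) none := by
  unfold PySem.List.max?
  refine PySem.List.foldl_congr_mem l _ _ none ?_
  intro acc x _
  cases acc <;> rfl

theorem maxfold_lt (key : Int → Int) (v : Int) (l : List Int)
    (hl : ∀ y ∈ l, key y < key v) (acc : Option Int)
    (hacc : ∀ a, acc = some a → key a < key v) :
    ∀ a, l.foldl (maxStep key) acc = some a → key a < key v := by
  induction l generalizing acc with
  | nil => simpa using hacc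
  | cons x xs ih =>
    intro a ha
    refine ih (fun y hy => hl y (by simp [hy])) _ ?_ a ha
    intro b hb
    cases acc with
    | none => cases hb; exact hl x (by simp)
    | some c =>
      simp only [maxStep] at hb
      split at hb
      · cases hb; exact hl x (by simp)
      · cases hb; exact hacc _ rfl

theorem maxfold_keep (key : Int → Int) (v : Int) (l : List Int)
    (h : ∀ y ∈ l, key y ≤ key v) :
    l.foldl (maxStep key) (some v) = some v := by
  induction l with
  | nil => rfl
  | cons x xs ih =>
    have hx : ¬ key v < key x := not_lt.mpr (h x (by simp))
    simp only [List.foldl_cons, maxStep, if_neg hx]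
    exact ih (fun y hy => h y (by simp [hy]))

theorem max?_append (key : Int → Int) (l₁ l₂ : List Int) (v : Int)
    (h1 : ∀ y ∈ l₁, key y < key v) (h2 : ∀ y ∈ l₂, key y ≤ key v) :
    PySem.List.max? (l₁ ++ v :: l₂) key = some v := by
  rw [max?_eq_foldl_maxStep, List.foldl_append]
  rcases hr : l₁.foldl (maxStep key) none with _ | a
  · simp only [List.foldl_cons, maxStep]
    exact maxfold_keep key v l₂ h2
  · have ha : key a < key v := maxfold_lt key v l₁ h1 none (by simp) a hr
    simp only [List.foldl_cons, maxStep, if_pos ha]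
    exact maxfold_keep key v l₂ h2

-- A's three eviction passes collapse to: remove the argmax from the list and the dict.
theorem mfuEvict_eq (active : List Int) (freq : PySem.Dict Int Int)
    (m : Int) (hmax : PySem.List.max? active (fun q => freq.getD q 0) = some m) :
    mfuEvict active freq = (active.erase m, freq.erase m) := by
  have hm : m ∈ active := PySem.List.max?_mem hmax
  cases hi : List.idxOf? m active with
  | none => exact absurd (List.idxOf?_eq_none_iff.mp hi) (by simpa using hm)
  | some i =>
    obtain ⟨hilt, hig, -⟩ := List.idxOf?_eq_some_iff.mp hi
    have hpop : PySem.List.pop? active (i : Int) = some (m, active.eraseIdx i) := by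
      simp [PySem.List.pop?, PySem.List.pyIdx?, hilt, hig]
    have herase : active.eraseIdx i = active.erase m := by
      rw [List.erase_eq_eraseIdx, hi]
    simp [mfuEvict, PySem.List.index?, hmax, hi, hpop, herase]

theorem find?_filter_ne {ν : Type} (ps : List (Int × ν)) (k k' : Int) (h : k' ≠ k) :
    List.find? (fun p => p.1 == k') (ps.filter (fun p => !(p.1 == k)))
      = List.find? (fun p => p.1 == k') ps := by
  induction ps with
  | nil => rfl
  | cons p ps ih =>
    by_cases hp : p.1 = k
    · rw [List.filter_cons, List.find?_cons]
      rw [show (!(p.1 == k)) = false by simp [hp]]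
      rw [show (p.1 == k') = false by simp [hp, Ne.symm h]]
      simpa using ih
    · rw [List.filter_cons]
      rw [show (!(p.1 == k)) = true by simp [hp]]
      simp only [if_true, List.find?_cons]
      by_cases hp' : p.1 = k'
      · simp [hp']
      · simp only [show (p.1 == k') = false by simp [hp']]
        exact ih

theorem get?_erase_of_ne {ν : Type} (d : PySem.Dict Int ν) (k k' : Int) (h : k' ≠ k) :
    (d.erase k).get? k' = d.get? k' := by
  rcases d with ⟨items⟩
  simp only [PySem.Dict.get?, PySem.Dict.erase]
  rw [find?_filter_ne items k k' h]

theorem get?_erase_self {ν : Type} (d : PySem.Dict Int ν) (k : Int) :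
    (d.erase k).get? k = none := by
  rcases d with ⟨items⟩
  simp only [PySem.Dict.get?, PySem.Dict.erase]
  rw [List.find?_eq_none.mpr]
  · rfl
  · intro x hx
    have := (List.mem_filter.mp hx).2
    simpa using this

theorem getD_erase_of_ne (d : PySem.Dict Int Int) (k k' : Int) (h : k' ≠ k) :
    (d.erase k).getD k' 0 = d.getD k' 0 := by
  simp only [PySem.Dict.getD]
  rw [get?_erase_of_ne d k k' h]

-- The simulation invariant: S is the frame content in load order with entries
-- (-freq, load_seq, page); cache is its priority-sorted arrangement; freq is A's
-- frequency dict and index is B's page -> entry dict.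
def MfuInv (S cache : List (Int × Int × Int)) (freq : PySem.Dict Int Int)
    (index : PySem.Dict Int (Int × Int × Int)) (seq : Int) : Prop :=
  cache.Perm S ∧
  cache.Pairwise (fun a b => entLt a b = true) ∧
  S.Pairwise (fun a b => a.2.1 < b.2.1) ∧
  (∀ e ∈ S, e.2.1 < seq) ∧
  (S.map (fun e => e.2.2)).Nodup ∧
  (∀ e ∈ S, freq.getD e.2.2 0 = -e.1) ∧
  (∀ e ∈ S, index.get? e.2.2 = some e) ∧
  (∀ q : Int, q ∉ S.map (fun e => e.2.2) → index.get? q = none)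

theorem step_equiv (frames : Int) (hf : frames ≠ 0) (page fl seq : Int)
    (S cache : List (Int × Int × Int)) (freq : PySem.Dict Int Int)
    (index : PySem.Dict Int (Int × Int × Int))
    (h : MfuInv S cache freq index seq) :
    ∃ S' cache' freq' index' seq' fl', MfuInv S' cache' freq' index' seq' ∧
      mfuStepA frames (S.map (fun e => e.2.2), fl, freq) page = (S'.map (fun e => e.2.2), fl', freq') ∧
      mfuStepB frames (cache, index, fl, seq) page = (cache', index', fl', seq') := by
  obtain ⟨hperm, hpw, hseq, hbound, hpages, hfreq, hidx, hnone⟩ := h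
  have hSnodup : S.Nodup := hseq.imp (fun hlt => by rintro rfl; omega)
  have hseqmapnodup : (S.map (fun e => e.2.1)).Nodup :=
    (List.pairwise_map.mpr hseq).imp (fun hlt => by omega)
  have hcseqnodup : (cache.map (fun e => e.2.1)).Nodup :=
    ((hperm.map (fun e => e.2.1)).nodup_iff).mpr hseqmapnodup
  have hcpages : (cache.map (fun e => e.2.2)).Nodup :=
    ((hperm.map (fun e => e.2.2)).nodup_iff).mpr hpages
  by_cases hmem : page ∈ S.map (fun e => e.2.2)
  · -- HIT: the page is loaded
    obtain ⟨e₀, he₀S, hpe⟩ := List.mem_map.mp hmem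
    have hget : index.get? page = some e₀ := by rw [← hpe]; exact hidx e₀ he₀S
    have he₀ : e₀ ∈ cache := hperm.mem_iff.mpr he₀S
    obtain ⟨l₁, l₂, rfl⟩ := List.append_of_mem he₀
    -- uniqueness of the matching entry
    have hmaps : (l₁.map (fun e => e.2.2) ++ e₀.2.2 :: l₂.map (fun e => e.2.2)).Nodup := by
      simpa using hcpages
    have hnl₁ : ∀ e ∈ l₁, e.2.2 ≠ page := by
      intro e he hEq
      exact List.disjoint_of_nodup_append hmaps (List.mem_map_of_mem he)
        (by simp [hEq, hpe])
    have hnl₂ : ∀ e ∈ l₂, e.2.2 ≠ page := by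
      intro e he hEq
      exact (List.nodup_cons.mp (List.nodup_append.mp hmaps).2.1).1
        (by rw [hpe, ← hEq]; exact List.mem_map_of_mem he)
    have hcnodup : (l₁ ++ e₀ :: l₂).Nodup := hperm.nodup_iff.mpr hSnodup
    have hrem : PySem.List.remove? (l₁ ++ e₀ :: l₂) e₀ = some (l₁ ++ l₂) := by
      rw [remove?_of_mem _ _ he₀]
      rw [List.erase_append_right _ (by
        intro hc
        exact (List.disjoint_of_nodup_append hcnodup) hc (by simp))]
      rw [List.erase_cons_head]
    -- seqs of the other entries differ from e₀'s
    have hsne : ∀ x ∈ l₁ ++ l₂, x.2.1 ≠ e₀.2.1 := by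
      intro x hx hEq
      have hm : (l₁.map (fun e => e.2.1) ++ e₀.2.1 :: l₂.map (fun e => e.2.1)).Nodup := by
        simpa using hcseqnodup
      rcases List.mem_append.mp hx with hx1 | hx2
      · exact List.disjoint_of_nodup_append hm (List.mem_map_of_mem hx1) (by simp [hEq])
      · exact (List.nodup_cons.mp (List.nodup_append.mp hm).2.1).1
          (by rw [← hEq]; exact List.mem_map_of_mem hx2)
    have hpwrest : (l₁ ++ l₂).Pairwise (fun a b => entLt a b = true) :=
      hpw.sublist ((List.sublist_cons_self e₀ l₂).append_left l₁)
    set upd : (Int × Int × Int) → (Int × Int × Int) :=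
      fun x => if x.2.2 = page then (x.1 - 1, x.2.1, x.2.2) else x with hupd
    have hupd21 : ∀ x, (upd x).2.1 = x.2.1 := by
      intro x; simp only [hupd]; by_cases hx : x.2.2 = page <;> simp [hx]
    have hupd22 : ∀ x, (upd x).2.2 = x.2.2 := by
      intro x; simp only [hupd]; by_cases hx : x.2.2 = page <;> simp [hx]
    have hmappages : (S.map upd).map (fun e => e.2.2) = S.map (fun e => e.2.2) := by
      rw [List.map_map]; exact List.map_congr_left (fun x _ => hupd22 x)
    refine ⟨S.map upd, insEnt (e₀.1 - 1, e₀.2.1, page) (l₁ ++ l₂),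
      freq.insert page (freq.getD page 0 + 1),
      index.insert page (e₀.1 - 1, e₀.2.1, page), seq, fl,
      ⟨?_, ?_, ?_, ?_, ?_, ?_, ?_, ?_⟩, ?_, ?_⟩
    · -- permutation
      have hmapupd : (l₁ ++ e₀ :: l₂).map upd = l₁ ++ (e₀.1 - 1, e₀.2.1, page) :: l₂ := by
        rw [List.map_append, List.map_cons]
        rw [show l₁.map upd = l₁.map id from
            List.map_congr_left (fun e he => by simp [hupd, hnl₁ e he]),
          show l₂.map upd = l₂.map id from
            List.map_congr_left (fun e he => by simp [hupd, hnl₂ e he]),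
          List.map_id, List.map_id]
        simp only [hupd, if_pos hpe]
        rw [← hpe]
      refine (insEnt_perm _ _).trans (List.perm_middle.symm.trans ?_)
      rw [← hmapupd]
      exact hperm.map upd
    · -- sortedness
      refine insEnt_pairwise hpwrest ?_
      intro x hx
      exact entLt_total x _ (by simpa using hsne x hx)
    · -- seqs increasing along S
      refine List.pairwise_map.mpr (hseq.imp ?_)
      intro a b hab
      rw [hupd21, hupd21]; exact hab
    · -- seq bound
      intro e he
      obtain ⟨x, hx, rfl⟩ := List.mem_map.mp he
      rw [hupd21]; exact hbound x hx
    · -- pages nodup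
      rw [hmappages]; exact hpages
    · -- freq dict agreement
      intro e he
      obtain ⟨x, hx, rfl⟩ := List.mem_map.mp he
      by_cases hxp : x.2.2 = page
      · simp only [hupd, if_pos hxp]
        show (freq.insert page (freq.getD page 0 + 1)).getD x.2.2 0 = -(x.1 - 1)
        rw [hxp, PySem.Dict.getD_insert_self]
        have := hfreq x hx
        rw [hxp] at this
        omega
      · simp only [hupd, if_neg hxp]
        rw [PySem.Dict.getD_insert_of_ne _ _ _ hxp]
        exact hfreq x hx
    · -- index dict: every loaded entry is indexed
      intro e he
      obtain ⟨x, hx, rfl⟩ := List.mem_map.mp he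
      by_cases hxp : x.2.2 = page
      · have hx₀ : x = e₀ := by
          have h1 := hidx x hx
          rw [hxp, hget] at h1
          exact (Option.some.inj h1).symm
        subst hx₀
        rw [hupd22, hxp, PySem.Dict.get?_insert_self]
        simp only [hupd, if_pos hxp, hxp]
      · rw [hupd22]
        rw [PySem.Dict.get?_insert_of_ne _ _ hxp]
        simp only [hupd, if_neg hxp]
        exact hidx x hx
    · -- index dict: nothing else is indexed
      intro q hq
      rw [hmappages] at hq
      have hqp : q ≠ page := fun hc => hq (hc ▸ hmem)
      rw [PySem.Dict.get?_insert_of_ne _ _ hqp]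
      exact hnone q hq
    · -- A's step
      have hcont : (S.map (fun e => e.2.2)).contains page = true := by simpa using hmem
      simp only [mfuStepA, hcont]
      rw [hmappages]
      simp
    · -- B's step
      simp only [mfuStepB, hget, hrem]
      rw [insort_eq _ _ hpwrest]
  · -- MISS: page fault
    have hget : index.get? page = none := hnone page hmem
    have hcont : (S.map (fun e => e.2.2)).contains page = false := by simpa using hmem
    have hlen : (cache.length : Int) = ((S.map (fun e => e.2.2)).length : Int) := by
      rw [List.length_map, hperm.length_eq]
    by_cases hfull : (cache.length : Int) = frames
    · -- eviction
      have hne : cache ≠ [] := by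
        intro hc; rw [hc] at hfull; simp at hfull; omega
      obtain ⟨v, rest, rfl⟩ := List.exists_cons_of_ne_nil hne
      have hvS : v ∈ S := hperm.mem_iff.mp (by simp)
      obtain ⟨t₁, t₂, rfl⟩ := List.append_of_mem hvS
      have hvmin : ∀ x ∈ rest, entLt v x = true := (List.pairwise_cons.mp hpw).1
      have hpwrest : rest.Pairwise (fun a b => entLt a b = true) := (List.pairwise_cons.mp hpw).2
      have hrestperm : rest.Perm (t₁ ++ t₂) := (hperm.trans List.perm_middle).cons_inv
      have hvnotin : v ∉ t₁ ++ t₂ := by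
        rcases List.nodup_append.mp hSnodup with ⟨-, h2, hdisj⟩
        intro hc
        rcases List.mem_append.mp hc with hc1 | hc2
        · exact hdisj v hc1 v (by simp) rfl
        · exact (List.nodup_cons.mp h2).1 hc2
      -- every other entry is in rest
      have hmemrest : ∀ e, e ∈ t₁ ++ t₂ → e ∈ rest := by
        intro e he
        have : e ∈ v :: rest := hperm.mem_iff.mpr (by
          rcases List.mem_append.mp he with h1 | h2
          · exact List.mem_append.mpr (Or.inl h1)
          · exact List.mem_append.mpr (Or.inr (List.mem_cons_of_mem v h2)))
        rcases this with _ | hr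
        · exact absurd he hvnotin
        · assumption
      -- key values
      have hkey : ∀ e ∈ t₁ ++ v :: t₂, freq.getD e.2.2 0 = -e.1 := hfreq
      have hseqt₁ : ∀ e ∈ t₁, e.2.1 < v.2.1 := by
        have := List.pairwise_append.mp hseq
        intro e he
        exact this.2.2 e he v (by simp)
      -- the Python max over the load-ordered frame list is the head of the priority list
      have hmax : PySem.List.max? ((t₁ ++ v :: t₂).map (fun e => e.2.2))
          (fun q => freq.getD q 0) = some v.2.2 := by
        rw [List.map_append, List.map_cons]
        refine max?_append _ _ _ _ ?_ ?_
        · intro y hy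
          obtain ⟨e, he, rfl⟩ := List.mem_map.mp hy
          rw [hkey e (by simp [he]), hkey v (by simp)]
          have hlt := hvmin e (hmemrest e (List.mem_append.mpr (Or.inl he)))
          rw [entLt_true_iff] at hlt
          have := hseqt₁ e he
          omega
        · intro y hy
          obtain ⟨e, he, rfl⟩ := List.mem_map.mp hy
          rw [hkey e (by simp [he]), hkey v (by simp)]
          have hlt := hvmin e (hmemrest e (List.mem_append.mpr (Or.inr he)))
          rw [entLt_true_iff] at hlt
          omega
      -- pages of t₁/t₂ differ from v's and from the new page
      have hpnodup : ((t₁ ++ v :: t₂).map (fun e => e.2.2)).Nodup := hpages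
      have hpvne : ∀ e ∈ t₁ ++ t₂, e.2.2 ≠ v.2.2 := by
        intro e he hEq
        have hpn : (t₁.map (fun e => e.2.2) ++ v.2.2 :: t₂.map (fun e => e.2.2)).Nodup := by
          simpa using hpnodup
        rcases List.mem_append.mp he with h1 | h2'
        · exact List.disjoint_of_nodup_append hpn (List.mem_map_of_mem h1) (by simp [hEq])
        · exact (List.nodup_cons.mp (List.nodup_append.mp hpn).2.1).1
            (by rw [← hEq]; exact List.mem_map_of_mem h2')
      have herase : ((t₁ ++ v :: t₂).map (fun e => e.2.2)).erase v.2.2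
          = (t₁ ++ t₂).map (fun e => e.2.2) := by
        rw [List.map_append, List.map_cons]
        rw [List.erase_append_right _ (by
          intro hc
          obtain ⟨e, he, hEq⟩ := List.mem_map.mp hc
          exact hpvne e (List.mem_append.mpr (Or.inl he)) hEq)]
        rw [List.erase_cons_head, List.map_append]
      refine ⟨(t₁ ++ t₂) ++ [(-1, seq, page)], insEnt (-1, seq, page) rest,
        (freq.erase v.2.2).insert page 1,
        (index.erase v.2.2).insert page (-1, seq, page), seq + 1, fl + 1,
        ⟨?_, ?_, ?_, ?_, ?_, ?_, ?_, ?_⟩, ?_, ?_⟩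
      · exact (insEnt_perm _ _).trans
          ((hrestperm.cons _).trans (List.perm_append_singleton _ _).symm)
      · refine insEnt_pairwise hpwrest ?_
        intro x hx
        refine entLt_total x _ ?_
        have : x ∈ t₁ ++ v :: t₂ := hperm.mem_iff.mp (by simp [hx])
        have := hbound x this
        simp; omega
      · refine List.pairwise_append.mpr ⟨hseq.sublist ((List.sublist_cons_self v t₂).append_left t₁), by simp, ?_⟩
        intro a ha b hb
        rcases List.mem_singleton.mp hb with rfl
        have : a ∈ t₁ ++ v :: t₂ := ((List.sublist_cons_self v t₂).append_left t₁).mem ha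
        simpa using hbound a this
      · intro e he
        rcases List.mem_append.mp he with h1 | h2
        · have : e ∈ t₁ ++ v :: t₂ := ((List.sublist_cons_self v t₂).append_left t₁).mem h1
          have := hbound e this
          omega
        · rcases List.mem_singleton.mp h2 with rfl
          simp
      · rw [List.map_append]
        refine List.Nodup.append ?_ (by simp) ?_
        · exact hpages.sublist (((List.sublist_cons_self v t₂).append_left t₁).map _)
        · intro x hx hy
          rcases List.mem_singleton.mp hy with rfl
          obtain ⟨e, he, hEq⟩ := List.mem_map.mp hx
          exact hmem (by
            rw [← hEq]
            exact List.mem_map_of_mem (((List.sublist_cons_self v t₂).append_left t₁).mem he))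
      · intro e he
        rcases List.mem_append.mp he with h1 | h2
        · have heS : e ∈ t₁ ++ v :: t₂ := ((List.sublist_cons_self v t₂).append_left t₁).mem h1
          have hep : e.2.2 ≠ page := by
            intro hc; exact hmem (hc ▸ List.mem_map_of_mem heS)
          rw [PySem.Dict.getD_insert_of_ne _ _ _ hep,
            getD_erase_of_ne _ _ _ (hpvne e h1)]
          exact hfreq e heS
        · rcases List.mem_singleton.mp h2 with rfl
          show ((freq.erase v.2.2).insert page 1).getD page 0 = -(-1 : Int)
          rw [PySem.Dict.getD_insert_self]
          norm_num
      · -- index dict: every loaded entry is indexed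
        intro e he
        rcases List.mem_append.mp he with h1 | h2
        · have heS : e ∈ t₁ ++ v :: t₂ := ((List.sublist_cons_self v t₂).append_left t₁).mem h1
          have hep : e.2.2 ≠ page := by
            intro hc; exact hmem (hc ▸ List.mem_map_of_mem heS)
          rw [PySem.Dict.get?_insert_of_ne _ _ hep,
            get?_erase_of_ne _ _ _ (hpvne e h1)]
          exact hidx e heS
        · rcases List.mem_singleton.mp h2 with rfl
          rw [PySem.Dict.get?_insert_self]
      · -- index dict: nothing else is indexed
        intro q hq
        rw [List.map_append] at hq
        have hqp : q ≠ page := fun hc => hq (by simp [hc])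
        rw [PySem.Dict.get?_insert_of_ne _ _ hqp]
        by_cases hqv : q = v.2.2
        · rw [hqv, get?_erase_self]
        · rw [get?_erase_of_ne _ _ _ hqv]
          refine hnone q ?_
          intro hc
          rw [List.map_append, List.map_cons] at hc
          rcases List.mem_append.mp hc with h1 | h2
          · exact hq (List.mem_append.mpr (Or.inl
              (by rw [List.map_append]; exact List.mem_append.mpr (Or.inl h1))))
          · rcases List.mem_cons.mp h2 with h3 | h4
            · exact hqv h3
            · exact hq (List.mem_append.mpr (Or.inl
              (by rw [List.map_append]; exact List.mem_append.mpr (Or.inr h4))))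
      · -- A's step
        simp only [mfuStepA, hcont]
        rw [if_pos trivial, if_pos (by rw [← hlen]; exact hfull)]
        rw [mfuEvict_eq _ _ _ hmax, herase]
        rw [List.map_append]
        simp
      · -- B's step
        simp only [mfuStepB, hget]
        rw [if_pos hfull, PySem.List.pop?_zero_cons]
        rw [insort_eq _ _ hpwrest]
    · -- no eviction
      refine ⟨S ++ [(-1, seq, page)], insEnt (-1, seq, page) cache,
        freq.insert page 1, index.insert page (-1, seq, page), seq + 1, fl + 1,
        ⟨?_, ?_, ?_, ?_, ?_, ?_, ?_, ?_⟩, ?_, ?_⟩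
      · exact (insEnt_perm _ _).trans
          ((hperm.cons _).trans (List.perm_append_singleton _ _).symm)
      · refine insEnt_pairwise hpw ?_
        intro x hx
        refine entLt_total x _ ?_
        have := hbound x (hperm.mem_iff.mp hx)
        simp; omega
      · refine List.pairwise_append.mpr ⟨hseq, by simp, ?_⟩
        intro a ha b hb
        rcases List.mem_singleton.mp hb with rfl
        simpa using hbound a ha
      · intro e he
        rcases List.mem_append.mp he with h1 | h2
        · have := hbound e h1; omega
        · rcases List.mem_singleton.mp h2 with rfl; simp
      · rw [List.map_append]
        refine List.Nodup.append hpages (by simp) ?_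
        intro x hx hy
        rcases List.mem_singleton.mp hy with rfl
        exact hmem hx
      · intro e he
        rcases List.mem_append.mp he with h1 | h2
        · have hep : e.2.2 ≠ page := by
            intro hc; exact hmem (hc ▸ List.mem_map_of_mem h1)
          rw [PySem.Dict.getD_insert_of_ne _ _ _ hep]
          exact hfreq e h1
        · rcases List.mem_singleton.mp h2 with rfl
          show (freq.insert page 1).getD page 0 = -(-1 : Int)
          rw [PySem.Dict.getD_insert_self]
          norm_num
      · -- index dict: every loaded entry is indexed
        intro e he
        rcases List.mem_append.mp he with h1 | h2
        · have hep : e.2.2 ≠ page := by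
            intro hc; exact hmem (hc ▸ List.mem_map_of_mem h1)
          rw [PySem.Dict.get?_insert_of_ne _ _ hep]
          exact hidx e h1
        · rcases List.mem_singleton.mp h2 with rfl
          rw [PySem.Dict.get?_insert_self]
      · -- index dict: nothing else is indexed
        intro q hq
        rw [List.map_append] at hq
        have hqp : q ≠ page := fun hc => hq (by simp [hc])
        rw [PySem.Dict.get?_insert_of_ne _ _ hqp]
        exact hnone q (fun hc => hq (List.mem_append.mpr (Or.inl hc)))
      · simp only [mfuStepA, hcont]
        rw [if_pos trivial, if_neg (by rw [← hlen]; exact hfull)]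
        rw [List.map_append]
        simp
      · simp only [mfuStepB, hget]
        rw [if_neg hfull]
        rw [insort_eq _ _ hpw]

theorem fold_equiv (frames : Int) (hf : frames ≠ 0) (pages : List Int) :
    ∀ (fl seq : Int) (S cache : List (Int × Int × Int)) (freq : PySem.Dict Int Int)
      (index : PySem.Dict Int (Int × Int × Int)),
      MfuInv S cache freq index seq →
      (pages.foldl (mfuStepA frames) (S.map (fun e => e.2.2), fl, freq)).2.1
        = (pages.foldl (mfuStepB frames) (cache, index, fl, seq)).2.2.1 := by
  induction pages with
  | nil => intro fl seq S cache freq index _; rfl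
  | cons p t ih =>
    intro fl seq S cache freq index h
    obtain ⟨S', cache', freq', index', seq', fl', h', hA, hB⟩ :=
      step_equiv frames hf p fl seq S cache freq index h
    rw [List.foldl_cons, List.foldl_cons, hA, hB]
    exact ih fl' seq' S' cache' freq' index' h'

-- ===== VERDICT (by name: the statement is the Claim_ definition above) =====
theorem mfu_spec : Claim_equal_mfu := by
  intro pages frames _ hpre
  unfold Spec_mfu mfu mfu_alt
  by_cases h0 : frames = 0
  · subst h0; rw [hpre rfl]; rfl
  · have h := fold_equiv frames h0 pages 0 0 [] [] PySem.Dict.empty PySem.Dict.empty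
      ⟨List.Perm.refl _, List.Pairwise.nil, List.Pairwise.nil, by simp, by simp, by simp,
        by simp, by intro q _; rfl⟩
    simpa using h
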